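-- pv_equiv track=rewrite | github.com/connn8/130PA5_python | crack.py | transform_digits
-- ===== SOURCE A (Python) =====
-- def transform_digits(str):
--    d = {'O':['0'],'Z':['2'],'A':['4'],'B':['6','8'],'I':['1'],'L':['1'],'E':['3'],'S':['5'],'T':['7'],'G':['9'],'Q':['9']}
--    def helper(x,l,str1):
--      l.append(str1)
--      for i in range(x,len(str1)):                           #for every element of the string
--        if (str1[i].upper() in d):                           #checks to see if it is a key in the dictionary
--           valList = d[str1[i].upper()]                      #and gets the list of values
--           for j in range(0,len(valList)):                   #recursively replaces the letters with the possible digits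
--             mod_str = str1[:i] + valList[j] + str1[i+1:]
--             helper(i+1,l,mod_str)
--      return l
--    return helper(0,[],str)
-- ===== SOURCE B (Python) =====
-- def transform_digits(str):
--     d = {'O':['0'],'Z':['2'],'A':['4'],'B':['6','8'],'I':['1'],'L':['1'],'E':['3'],'S':['5'],'T':['7'],'G':['9'],'Q':['9']}
--     result = []
--     stack = [(0, str)]
--     while stack:
--         x, s = stack.pop()
--         result.append(s)
--         children = [(i + 1, s[:i] + v + s[i+1:])
--                     for i in range(x, len(s))
--                     if s[i].upper() in d
--                     for v in d[s[i].upper()]]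
--         stack.extend(reversed(children))
--     return result
-- ===== Notes on version B (the rewrite author's own statement) =====
-- stated objective: alternative
-- what changed: Replaces the nested recursive helper (recursion inside two nested for-loops with a mutated accumulator list) by an explicit stack-based worklist DFS: pop a node, append its string, push its substitution children in reverse so LIFO popping reproduces the original pre-order sequence.
import Mathlib
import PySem

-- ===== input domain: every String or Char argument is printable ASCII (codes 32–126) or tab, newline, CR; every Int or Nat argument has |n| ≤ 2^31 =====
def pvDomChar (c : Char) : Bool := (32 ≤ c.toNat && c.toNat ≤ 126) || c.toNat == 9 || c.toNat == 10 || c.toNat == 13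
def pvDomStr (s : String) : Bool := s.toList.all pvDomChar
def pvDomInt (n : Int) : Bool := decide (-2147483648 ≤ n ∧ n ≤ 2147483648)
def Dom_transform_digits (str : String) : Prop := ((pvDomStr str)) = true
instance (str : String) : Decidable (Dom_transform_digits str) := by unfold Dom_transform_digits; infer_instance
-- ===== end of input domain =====

-- B rewrites A's nested recursive helper as an explicit stack-based worklist DFS (same outputs, same order); alternative decomposition, no speed claim.

-- the letter→digits dictionary of both programs (values are the single-digit replacement characters)
def pvDigits (c : Char) : List Char :=
  if c = 'O' then ['0'] else if c = 'Z' then ['2'] else if c = 'A' then ['4']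
  else if c = 'B' then ['6','8'] else if c = 'I' then ['1'] else if c = 'L' then ['1']
  else if c = 'E' then ['3'] else if c = 'S' then ['5'] else if c = 'T' then ['7']
  else if c = 'G' then ['9'] else if c = 'Q' then ['9'] else []

-- str1[:i] + v + str1[i+1:]  (i < len, v one character)
def pvMod (s : List Char) (i : Nat) (v : Char) : List Char :=
  s.take i ++ [v] ++ s.drop (i+1)

theorem pvMod_length (s : List Char) (i : Nat) (v : Char) (h : i < s.length) :
    (pvMod s i v).length = s.length := by
  simp [pvMod]; omega

-- ===== PORT A =====
-- helper(x, l, str1): l.append(str1); for i in range(x, len): if key in d: for v in d[key]: helper(i+1, l, mod)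
mutual
def pvHelperA (x : Nat) (l : List String) (s : List Char) : List String :=
  pvForI x (l ++ [String.ofList s]) s
termination_by (s.length + 1 - x, 2, 0)
decreasing_by exact Prod.Lex.right _ (Prod.Lex.left _ _ (by omega))

def pvForI (i : Nat) (l : List String) (s : List Char) : List String :=
  if _h : i < s.length then
    pvForI (i+1) (pvForJ (pvDigits ((s.getD i ' ').toUpper)) i l s) s
  else l
termination_by (s.length + 1 - i, 1, 0)
decreasing_by
  · exact Prod.Lex.right _ (Prod.Lex.left _ _ (by omega))
  · exact Prod.Lex.left _ _ (by omega)

def pvForJ (vals : List Char) (i : Nat) (l : List String) (s : List Char) : List String :=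
  match vals with
  | [] => l
  | v :: vs =>
    -- the 'if' only totalises: pvForJ is only ever invoked with i < s.length
    if _h : i < s.length then pvForJ vs i (pvHelperA (i+1) l (pvMod s i v)) s else l
termination_by (s.length + 1 - i, 0, vals.length)
decreasing_by
  · exact Prod.Lex.left _ _ (by rw [pvMod_length s i v _h]; omega)
  · exact Prod.Lex.right _ (Prod.Lex.right _ (by simp))
end

def transform_digits (str : String) : List String :=
  pvHelperA 0 [] str.toList

-- ===== PORT B =====
-- children of a node (x, s): one node (i+1, s[:i]+v+s[i+1:]) per position i ∈ [x, len) and replacement v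
def pvChildren (x : Nat) (s : List Char) : List (Nat × List Char) :=
  (List.range' x (s.length - x)).flatMap
    (fun i => (pvDigits ((s.getD i ' ').toUpper)).map (fun v => (i+1, pvMod s i v)))

def pvMeasure (stack : List (Nat × List Char)) : Nat :=
  stack.foldr (fun p m => 3 ^ (p.2.length + 1 - p.1) + m) 0

theorem pvDigits_length_le (c : Char) : (pvDigits c).length ≤ 2 := by
  unfold pvDigits
  repeat' split
  all_goals simp

theorem pvMeasure_nil : pvMeasure [] = 0 := rfl

theorem pvMeasure_cons (p : Nat × List Char) (t : List (Nat × List Char)) :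
    pvMeasure (p :: t) = 3 ^ (p.2.length + 1 - p.1) + pvMeasure t := rfl

theorem pvMeasure_append (a b : List (Nat × List Char)) :
    pvMeasure (a ++ b) = pvMeasure a + pvMeasure b := by
  induction a with
  | nil => simp [pvMeasure_nil]
  | cons p t ih => rw [List.cons_append, pvMeasure_cons, pvMeasure_cons, ih]; omega

theorem pvMeasure_map (cs : List Char) (x : Nat) (s : List Char) (h : x < s.length) :
    pvMeasure (cs.map (fun v => (x+1, pvMod s x v))) = cs.length * 3 ^ (s.length - x) := by
  induction cs with
  | nil => simp [pvMeasure_nil]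
  | cons c t ih =>
    rw [List.map_cons, pvMeasure_cons, ih, List.length_cons]
    have : (pvMod s x c).length + 1 - (x + 1) = s.length - x := by
      rw [pvMod_length s x c h]; omega
    rw [this]; ring

theorem pvMeasure_children (x : Nat) (s : List Char) :
    pvMeasure (pvChildren x s) < 3 ^ (s.length + 1 - x) := by
  have key : ∀ n x, s.length - x = n → pvMeasure (pvChildren x s) < 3 ^ (s.length + 1 - x) := by
    intro n
    induction n with
    | zero =>
      intro x hx
      have he : pvChildren x s = [] := by simp [pvChildren, hx]
      rw [he, pvMeasure_nil]
      positivity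
    | succ k ih =>
      intro x hx
      have hxlt : x < s.length := by omega
      have hrange : List.range' x (s.length - x) = x :: List.range' (x+1) (s.length - (x+1)) := by
        rw [hx]
        have hk : s.length - (x+1) = k := by omega
        rw [hk, List.range'_succ]
      have hsplit : pvChildren x s =
          ((pvDigits ((s.getD x ' ').toUpper)).map (fun v => (x+1, pvMod s x v)))
            ++ pvChildren (x+1) s := by
        simp [pvChildren, hrange]
      have hhead := pvMeasure_map (pvDigits ((s.getD x ' ').toUpper)) x s hxlt
      have hlen := pvDigits_length_le ((s.getD x ' ').toUpper)
      have htail : pvMeasure (pvChildren (x+1) s) < 3 ^ (s.length + 1 - (x+1)) :=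
        ih (x+1) (by omega)
      rw [hsplit, pvMeasure_append, hhead]
      have e1 : s.length + 1 - (x+1) = s.length - x := by omega
      have e2 : s.length + 1 - x = (s.length - x) + 1 := by omega
      rw [e1] at htail
      rw [e2, pow_succ]
      have hpos : 0 < 3 ^ (s.length - x) := by positivity
      nlinarith
  exact key (s.length - x) x rfl

-- while stack: (x,s)=stack.pop(); result.append(s); stack.extend(reversed(children))
-- modelled with the stack top at the head: pop = head, extend(reversed(...)) = prepend in order
def pvGo (stack : List (Nat × List Char)) (acc : List String) : List String :=
  match stack with
  | [] => acc
  | (x, s) :: rest => pvGo (pvChildren x s ++ rest) (acc ++ [String.ofList s])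
termination_by pvMeasure stack
decreasing_by
  have h := pvMeasure_children x s
  rw [pvMeasure_append]
  show pvMeasure (pvChildren x s) + pvMeasure rest < 3 ^ (s.length + 1 - x) + pvMeasure rest
  omega

def transform_digits_alt (str : String) : List String :=
  pvGo [(0, str.toList)] []

-- ===== PRECONDITION & SPEC =====
def Spec_transform_digits (str : String) (out : List String) : Prop := out = transform_digits_alt str
instance (str : String) (out : List String) : Decidable (Spec_transform_digits str out) := by unfold Spec_transform_digits; infer_instance

-- ===== CLAIM (what is proved, stated in full; the proofs are below) =====
def Claim_equal_transform_digits : Prop := ∀ (str : String), Dom_transform_digits str → Spec_transform_digits str (transform_digits str)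

-- ===== LEMMAS AND PROOFS =====

-- step equations of A's mutual loops (one unfolding each)
theorem pvEqH (x : Nat) (l : List String) (s : List Char) :
    pvHelperA x l s = pvForI x (l ++ [String.ofList s]) s := by
  rw [pvHelperA]

theorem pvEqI (x : Nat) (l : List String) (s : List Char) (h : x < s.length) :
    pvForI x l s = pvForI (x+1) (pvForJ (pvDigits ((s.getD x ' ').toUpper)) x l s) s := by
  rw [pvForI]; simp [dif_pos h]

theorem pvEqI0 (x : Nat) (l : List String) (s : List Char) (h : ¬ x < s.length) :
    pvForI x l s = l := by
  rw [pvForI]; simp [h]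

theorem pvEqJ0 (x : Nat) (l : List String) (s : List Char) : pvForJ [] x l s = l := by
  rw [pvForJ]

theorem pvEqJ (v : Char) (vs : List Char) (x : Nat) (l : List String) (s : List Char)
    (h : x < s.length) :
    pvForJ (v :: vs) x l s = pvForJ vs x (pvHelperA (x+1) l (pvMod s x v)) s := by
  rw [pvForJ]; simp [dif_pos h]

theorem pvEqJn (v : Char) (vs : List Char) (x : Nat) (l : List String) (s : List Char)
    (h : ¬ x < s.length) : pvForJ (v :: vs) x l s = l := by
  rw [pvForJ]; simp [h]

-- accumulator lemmas: every variant of A's loop only ever appends to the mutated list l;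
-- proved simultaneously by strong induction on the remaining length s.length - x
theorem pvAppend (n : Nat) : ∀ (s : List Char) (x : Nat), s.length - x = n →
    ((∀ vals l, pvForJ vals x l s = l ++ pvForJ vals x [] s) ∧
     (∀ l, pvForI x l s = l ++ pvForI x [] s) ∧
     (∀ l, pvHelperA x l s = l ++ pvHelperA x [] s)) := by
  induction n using Nat.strong_induction_on with
  | _ n IH =>
  intro s x hn
  by_cases hx : x < s.length
  · have hn1 : n - 1 < n := by omega
    have hH1 : ∀ v l, pvHelperA (x+1) l (pvMod s x v) = l ++ pvHelperA (x+1) [] (pvMod s x v) :=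
      fun v => (IH (n-1) hn1 (pvMod s x v) (x+1) (by rw [pvMod_length s x v hx]; omega)).2.2
    have hI1 : ∀ l, pvForI (x+1) l s = l ++ pvForI (x+1) [] s :=
      (IH (n-1) hn1 s (x+1) (by omega)).2.1
    have hJ : ∀ vals l, pvForJ vals x l s = l ++ pvForJ vals x [] s := by
      intro vals
      induction vals with
      | nil => intro l; rw [pvEqJ0, pvEqJ0]; simp
      | cons v vs ihv =>
        intro l
        rw [pvEqJ v vs x l s hx, pvEqJ v vs x [] s hx,
            ihv (pvHelperA (x+1) l (pvMod s x v)), ihv (pvHelperA (x+1) [] (pvMod s x v)),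
            hH1 v l]
        simp
    have hI : ∀ l, pvForI x l s = l ++ pvForI x [] s := by
      intro l
      rw [pvEqI x l s hx, pvEqI x [] s hx,
          hI1 (pvForJ (pvDigits ((s.getD x ' ').toUpper)) x l s),
          hI1 (pvForJ (pvDigits ((s.getD x ' ').toUpper)) x [] s),
          hJ _ l]
      simp
    refine ⟨hJ, hI, ?_⟩
    intro l
    rw [pvEqH, pvEqH, hI (l ++ [String.ofList s]), hI ([] ++ [String.ofList s])]
    simp
  · refine ⟨?_, ?_, ?_⟩
    · intro vals l
      cases vals with
      | nil => rw [pvEqJ0, pvEqJ0]; simp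
      | cons v vs => rw [pvEqJn v vs x l s hx, pvEqJn v vs x [] s hx]; simp
    · intro l; rw [pvEqI0 x l s hx, pvEqI0 x [] s hx]; simp
    · intro l
      rw [pvEqH, pvEqH, pvEqI0 x (l ++ [String.ofList s]) s hx,
          pvEqI0 x ([] ++ [String.ofList s]) s hx]
      simp

theorem pvForI_append (i : Nat) (l : List String) (s : List Char) :
    pvForI i l s = l ++ pvForI i [] s :=
  ((pvAppend (s.length - i) s i rfl).2.1) l

-- the inner for-j loop emits one recursive block per replacement character
theorem pvForJ_eq (vals : List Char) (i : Nat) (s : List Char) (h : i < s.length) :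
    pvForJ vals i [] s = vals.flatMap (fun v => pvHelperA (i+1) [] (pvMod s i v)) := by
  induction vals with
  | nil => rw [pvEqJ0]; simp
  | cons v vs ihv =>
    rw [pvEqJ v vs i [] s h,
        (pvAppend (s.length - i) s i rfl).1 vs (pvHelperA (i+1) [] (pvMod s i v)), ihv]
    simp

-- the for-i loop emits exactly the blocks of the node's children, in order
theorem pvForI_eq (i : Nat) (s : List Char) :
    pvForI i [] s = (pvChildren i s).flatMap (fun p => pvHelperA p.1 [] p.2) := by
  have key : ∀ n i, s.length - i = n →
      pvForI i [] s = (pvChildren i s).flatMap (fun p => pvHelperA p.1 [] p.2) := by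
    intro n
    induction n with
    | zero =>
      intro i hi
      have hx : ¬ i < s.length := by omega
      rw [pvEqI0 i [] s hx]
      simp [pvChildren, hi]
    | succ k ih =>
      intro i hi
      have hx : i < s.length := by omega
      have hrange : List.range' i (s.length - i) = i :: List.range' (i+1) (s.length - (i+1)) := by
        rw [hi]
        have hk : s.length - (i+1) = k := by omega
        rw [hk, List.range'_succ]
      rw [pvEqI i [] s hx, pvForI_append, pvForJ_eq _ _ _ hx, ih (i+1) (by omega)]
      simp [pvChildren, hrange, List.flatMap_append, List.flatMap_map]
  exact key (s.length - i) i rfl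

-- one step of A's recursion: the node itself, then the pre-order listings of its children
theorem pvHelperA_node (x : Nat) (s : List Char) :
    pvHelperA x [] s = String.ofList s :: (pvChildren x s).flatMap (fun p => pvHelperA p.1 [] p.2) := by
  rw [pvEqH, pvForI_append]
  simp [pvForI_eq]

-- B's worklist loop flushes the stack into exactly the concatenated pre-order listings
theorem pvGo_eq (stack : List (Nat × List Char)) (acc : List String) :
    pvGo stack acc = acc ++ stack.flatMap (fun p => pvHelperA p.1 [] p.2) := by
  induction stack, acc using pvGo.induct with
  | case1 acc => simp [pvGo]
  | case2 acc x s rest ih =>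
    rw [pvGo, ih]
    simp only [List.flatMap_append, List.flatMap_cons]
    rw [pvHelperA_node x s]
    simp

-- ===== VERDICT (by name: the statement is the Claim_ definition above) =====
theorem transform_digits_spec : Claim_equal_transform_digits := by
  intro str _
  unfold Spec_transform_digits transform_digits transform_digits_alt
  rw [pvGo_eq]
  simp
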